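-- pv_equiv track=rewrite | github.com/Xaxetrov/advent_of_code | day10.py | execute
-- ===== SOURCE A (Python) =====
-- def execute(instructions: list):
--     cycle = 0
--     pixel = x = 1
--     next_logged_cycle = 20
--     log = []
--     drawing = '# '
--
--     for instruction, value in instructions:
--         cycle += 1
--
--         # Part 1
--         if cycle >= next_logged_cycle:
--             log.append(x * next_logged_cycle)
--             next_logged_cycle += 40
--
--         # Part 2
--         drawing += '# ' if x - 1 <= pixel <= x + 1 else '. '
--         pixel += 1
--         if pixel % 40 == 0:
--             drawing += '\n'
--             pixel = 0
--
--         x += value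
--
--     return log, drawing
-- ===== SOURCE B (Python) =====
-- def execute(instructions: list):
--     # Pass 1: table of the x-register value during each cycle (value before the update).
--     xs = []
--     x = 1
--     for _instruction, value in instructions:
--         xs.append(x)
--         x += value
--     # Pass 2: the sampled log values: cycles 20, 60, 100, ... are exactly c % 40 == 20.
--     log = [xv * c for c, xv in enumerate(xs, 1) if c % 40 == 20]
--     # Pass 3: the drawing, pixel column cadence identical to the CRT (starts at 1, wraps 40 -> 0).
--     parts = ['# ']
--     pixel = 1
--     for xv in xs:
--         parts.append('# ' if abs(pixel - xv) <= 1 else '. ')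
--         pixel += 1
--         if pixel % 40 == 0:
--             parts.append('\n')
--             pixel = 0
--     return log, ''.join(parts)
-- ===== Notes on version B (the rewrite author's own statement) =====
-- stated objective: alternative
-- what changed: A interleaves log sampling and CRT drawing in one simulation loop over six pieces of state; B first builds the table xs of the x-register value during each cycle, then derives the log by a comprehension over enumerate(xs,1) selecting cycles with c % 40 == 20, and draws in a third independent pass over xs collecting parts joined at the end.
import Mathlib
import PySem

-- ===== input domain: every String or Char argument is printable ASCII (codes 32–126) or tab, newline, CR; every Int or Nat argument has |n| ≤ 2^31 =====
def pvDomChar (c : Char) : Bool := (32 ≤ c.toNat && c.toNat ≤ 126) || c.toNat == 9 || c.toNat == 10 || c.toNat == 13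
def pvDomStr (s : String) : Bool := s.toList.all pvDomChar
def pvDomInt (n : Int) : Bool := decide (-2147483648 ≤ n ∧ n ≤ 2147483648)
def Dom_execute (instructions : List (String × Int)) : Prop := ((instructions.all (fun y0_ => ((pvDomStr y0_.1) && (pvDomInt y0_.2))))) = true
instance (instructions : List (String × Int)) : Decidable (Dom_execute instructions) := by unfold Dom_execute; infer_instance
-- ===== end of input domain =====

-- B replaces A's single interleaved simulation loop by an x-value table xs scanned once,
-- then two independent passes (a comprehension for the log, a pixel loop for the drawing): objective 'alternative'.

-- ===== PORT A =====
-- A's single for-loop over (instruction, value) pairs; the string concatenations are ported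
-- on List Char (exact) and packed into a String at the end.
-- State = (cycle, pixel, x, next_logged_cycle, log, drawing).
def execute (instructions : List (String × Int)) : List Int × String :=
  let st := instructions.foldl
    (fun (st : Int × Int × Int × Int × List Int × List Char) pr =>
      let cycle := st.1 + 1
      let pixel := st.2.1
      let x := st.2.2.1
      let nlc := st.2.2.2.1
      let log := st.2.2.2.2.1
      let drawing := st.2.2.2.2.2
      let p1 : List Int × Int := if cycle ≥ nlc then (log ++ [x * nlc], nlc + 40) else (log, nlc)
      let drawing := drawing ++ (if x - 1 ≤ pixel ∧ pixel ≤ x + 1 then ['#', ' '] else ['.', ' '])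
      let pixel := pixel + 1
      let p2 : List Char × Int := if PySem.Int.mod pixel 40 = 0 then (drawing ++ ['\n'], 0) else (drawing, pixel)
      (cycle, p2.2, x + pr.2, p1.2, p1.1, p2.1))
    (0, 1, 1, 20, ([] : List Int), ['#', ' '])
  (st.2.2.2.2.1, String.ofList st.2.2.2.2.2)

-- ===== PORT B =====
-- B's code: pass 1 builds the table xs of x during each cycle; pass 2 is the log comprehension
-- over enumerate(xs, 1); pass 3 is the pixel loop collecting parts, joined at the end
-- (strings ported on List Char, ''.join(parts) as PySem.Chars.join []).
-- the loop body of B's drawing pass, as a helper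
def pvBStep (st : Int × List (List Char)) (xv : Int) : Int × List (List Char) :=
  let pixel := st.1
  let parts := st.2 ++ [if |pixel - xv| ≤ 1 then ['#', ' '] else ['.', ' ']]
  let pixel := pixel + 1
  if PySem.Int.mod pixel 40 = 0 then (0, parts ++ [['\n']]) else (pixel, parts)

def execute_alt (instructions : List (String × Int)) : List Int × String :=
  let p := instructions.foldl (fun (st : List Int × Int) pr => (st.1 ++ [st.2], st.2 + pr.2)) ([], 1)
  let xs := p.1
  let log := ((PySem.List.enumerate xs 1).filter
      (fun cx => PySem.Int.mod cx.1 40 == 20)).map (fun cx => cx.2 * cx.1)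
  let q := xs.foldl pvBStep (1, [['#', ' ']])
  (log, String.ofList (PySem.Chars.join [] q.2))

-- ===== PRECONDITION & SPEC =====
def Spec_execute (instructions : List (String × Int)) (out : List Int × String) : Prop := out = execute_alt instructions
instance (instructions : List (String × Int)) (out : List Int × String) : Decidable (Spec_execute instructions out) := by unfold Spec_execute; infer_instance

-- ===== CLAIM (what is proved, stated in full; the proofs are below) =====
def Claim_equal_execute : Prop := ∀ (instructions : List (String × Int)), Dom_execute instructions → Spec_execute instructions (execute instructions)

-- ===== LEMMAS AND PROOFS =====

-- the x value during each cycle, starting from x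
def pvXs (x : Int) : List (String × Int) → List Int
  | [] => []
  | pr :: t => x :: pvXs (x + pr.2) t

-- A's log bookkeeping, isolated as a recursion over the x table
def pvRunLog : List Int → Int → Int → List Int → Int × List Int
  | [], _, nlc, log => (nlc, log)
  | xv :: t, c, nlc, log =>
      if c + 1 ≥ nlc then pvRunLog t (c + 1) (nlc + 40) (log ++ [xv * nlc])
      else pvRunLog t (c + 1) nlc log

-- A's drawing bookkeeping, isolated as a recursion over the x table
def pvRunDraw : List Int → Int → List Char → Int × List Char
  | [], p, d => (p, d)
  | xv :: t, p, d =>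
      let d := d ++ (if xv - 1 ≤ p ∧ p ≤ xv + 1 then ['#', ' '] else ['.', ' '])
      if PySem.Int.mod (p + 1) 40 = 0 then pvRunDraw t 0 (d ++ ['\n'])
      else pvRunDraw t (p + 1) d

-- the tail of the drawing produced from pixel column p onwards
def pvDrawTail : List Int → Int → List Char
  | [], _ => []
  | xv :: t, p =>
      (if xv - 1 ≤ p ∧ p ≤ xv + 1 then ['#', ' '] else ['.', ' ']) ++
      (if PySem.Int.mod (p + 1) 40 = 0 then '\n' :: pvDrawTail t 0 else pvDrawTail t (p + 1))

def pvXlast (x : Int) : List (String × Int) → Int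
  | [] => x
  | pr :: t => pvXlast (x + pr.2) t

theorem pv_A_split (l : List (String × Int)) (c p x nlc : Int) (log : List Int) (d : List Char) :
    l.foldl
      (fun (st : Int × Int × Int × Int × List Int × List Char) pr =>
        let cycle := st.1 + 1
        let pixel := st.2.1
        let x := st.2.2.1
        let nlc := st.2.2.2.1
        let log := st.2.2.2.2.1
        let drawing := st.2.2.2.2.2
        let p1 : List Int × Int := if cycle ≥ nlc then (log ++ [x * nlc], nlc + 40) else (log, nlc)
        let drawing := drawing ++ (if x - 1 ≤ pixel ∧ pixel ≤ x + 1 then ['#', ' '] else ['.', ' '])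
        let pixel := pixel + 1
        let p2 : List Char × Int := if PySem.Int.mod pixel 40 = 0 then (drawing ++ ['\n'], 0) else (drawing, pixel)
        (cycle, p2.2, x + pr.2, p1.2, p1.1, p2.1))
      (c, p, x, nlc, log, d)
    = (c + l.length, (pvRunDraw (pvXs x l) p d).1, pvXlast x l,
       (pvRunLog (pvXs x l) c nlc log).1, (pvRunLog (pvXs x l) c nlc log).2,
       (pvRunDraw (pvXs x l) p d).2) := by
  induction l generalizing c p x nlc log d with
  | nil => simp [pvXs, pvRunLog, pvRunDraw, pvXlast]
  | cons pr t ih =>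
      simp only [List.foldl_cons]
      rw [ih]
      by_cases h1 : c + 1 ≥ nlc <;> by_cases h2 : (40:Int) ∣ p + 1 <;>
        simp [pvXs, pvRunLog, pvRunDraw, pvXlast, h1, h2] <;> omega

theorem pv_B_xs (l : List (String × Int)) (acc : List Int) (x : Int) :
    l.foldl (fun (st : List Int × Int) pr => (st.1 ++ [st.2], st.2 + pr.2)) (acc, x)
      = (acc ++ pvXs x l, pvXlast x l) := by
  induction l generalizing acc x with
  | nil => simp [pvXs, pvXlast]
  | cons pr t ih => simp [pvXs, pvXlast, ih]

theorem pv_log_eq (xs : List Int) (c nlc : Int) (log : List Int) (k : Nat)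
    (hk : nlc = 20 + 40 * k) (h1 : c < nlc) (h2 : nlc ≤ c + 40) :
    (pvRunLog xs c nlc log).2
      = log ++ ((PySem.List.enumerate xs (c + 1)).filter
          (fun cx => PySem.Int.mod cx.1 40 == 20)).map (fun cx => cx.2 * cx.1) := by
  induction xs generalizing c nlc log k with
  | nil => simp [pvRunLog, PySem.List.enumerate]
  | cons xv t ih =>
      by_cases h : c + 1 ≥ nlc
      · have hc : c + 1 = nlc := by omega
        have hm : (c + 1) % 40 = 20 := by omega
        simp only [pvRunLog, if_pos h,
          ih (c + 1) (nlc + 40) _ (k + 1) (by omega) (by omega) (by omega)]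
        simp [PySem.List.enumerate_cons, hm, ← hc]
      · have hm : ¬((c + 1) % 40 = 20) := by omega
        simp only [pvRunLog, if_neg h,
          ih (c + 1) nlc log k hk (by omega) (by omega)]
        simp [PySem.List.enumerate_cons, hm]

theorem pv_draw_eq (xs : List Int) (p : Int) (d : List Char) :
    (pvRunDraw xs p d).2 = d ++ pvDrawTail xs p := by
  induction xs generalizing p d with
  | nil => simp [pvRunDraw, pvDrawTail]
  | cons xv t ih =>
      by_cases h : (40 : Int) ∣ p + 1 <;>
        simp [pvRunDraw, pvDrawTail, h, ih]

theorem pv_join (ps : List (List Char)) : PySem.Chars.join [] ps = ps.flatten := by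
  induction ps with
  | nil => rfl
  | cons a t ih => cases t with
    | nil => simp [PySem.Chars.join, List.intercalate]
    | cons b u => simp_all [PySem.Chars.join, List.intercalate, List.intersperse]

theorem pv_B_draw (xs : List Int) (p : Int) (parts : List (List Char)) :
    ((xs.foldl pvBStep (p, parts)).2).flatten = parts.flatten ++ pvDrawTail xs p := by
  induction xs generalizing p parts with
  | nil => simp [pvDrawTail]
  | cons xv t ih =>
      have hcond : (|p - xv| ≤ 1) ↔ (xv - 1 ≤ p ∧ p ≤ xv + 1) := by rw [abs_le]; omega
      rw [List.foldl_cons]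
      by_cases h : (40 : Int) ∣ p + 1
      · rw [show pvBStep (p, parts) xv
              = (0, parts ++ [if xv - 1 ≤ p ∧ p ≤ xv + 1 then ['#', ' '] else ['.', ' ']] ++ [['\n']])
            from by simp [pvBStep, h, hcond], ih]
        simp [pvDrawTail, h]
      · rw [show pvBStep (p, parts) xv
              = (p + 1, parts ++ [if xv - 1 ≤ p ∧ p ≤ xv + 1 then ['#', ' '] else ['.', ' ']])
            from by simp [pvBStep, h, hcond], ih]
        simp [pvDrawTail, h]

-- ===== VERDICT (by name: the statement is the Claim_ definition above) =====
theorem execute_spec : Claim_equal_execute := by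
  intro l _
  unfold Spec_execute execute execute_alt
  simp only [pv_A_split, pv_B_xs, pv_join, pv_B_draw, pv_draw_eq,
    pv_log_eq (pvXs 1 l) 0 20 [] 0 (by norm_num) (by norm_num) (by norm_num)]
  simp
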